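-- pv_equiv track=rewrite | github.com/Jfvsampaio/FGV-EMAp | Lista2/Lista 2 - Programação.py | portfolio_combinations
-- ===== SOURCE A (Python) =====
-- import itertools
--
-- def portfolio_combinations(assets, k):
--     """
--     Retorna todas as combinações possíveis de k ativos a partir de uma lista.
--
--     Parâmetros:
--     - assets: lista de nomes de ativos (strings)
--     - k: tamanho da combinação
--
--     Retorna:
--     - Lista de tuplas com combinações de ativos
--     """
--     if not isinstance(assets, list) or not all(isinstance(a, str) for a in assets):
--         raise ValueError("Assets deve ser uma lista de strings.")
--     if not isinstance(k, int) or k <= 0: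
--         raise ValueError("k deve ser um inteiro positivo.")
--     if k > len(assets):
--         raise ValueError("k não pode ser maior que o número de ativos.")
--
--     return list(itertools.combinations(assets, k))
-- ===== SOURCE B (Python) =====
-- def portfolio_combinations(assets, k):
--     """
--     Retorna todas as combinações possíveis de k ativos a partir de uma lista.
--     """
--     if not isinstance(assets, list) or not all(isinstance(a, str) for a in assets):
--         raise ValueError("Assets deve ser uma lista de strings.")
--     if not isinstance(k, int) or k <= 0:
--         raise ValueError("k deve ser um inteiro positivo.")
--     if k > len(assets):
--         raise ValueError("k não pode ser maior que o número de ativos.")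
--
--     result = []
--
--     def combine(remaining, chosen):
--         if len(chosen) == k:
--             result.append(tuple(chosen))
--             return
--         rest = remaining
--         while rest:
--             head, rest = rest[0], rest[1:]
--             combine(rest, chosen + [head])
--
--     combine(assets, [])
--     return result
-- ===== Notes on version B (the rewrite author's own statement) =====
-- stated objective: alternative
-- what changed: Replaces the itertools.combinations library call with an explicit backtracking recursion (take-each-head, recurse on the tail suffix, accumulate chosen prefix) that appends completed k-tuples to a result list in the same lexicographic-by-position order.
import Mathlib
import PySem

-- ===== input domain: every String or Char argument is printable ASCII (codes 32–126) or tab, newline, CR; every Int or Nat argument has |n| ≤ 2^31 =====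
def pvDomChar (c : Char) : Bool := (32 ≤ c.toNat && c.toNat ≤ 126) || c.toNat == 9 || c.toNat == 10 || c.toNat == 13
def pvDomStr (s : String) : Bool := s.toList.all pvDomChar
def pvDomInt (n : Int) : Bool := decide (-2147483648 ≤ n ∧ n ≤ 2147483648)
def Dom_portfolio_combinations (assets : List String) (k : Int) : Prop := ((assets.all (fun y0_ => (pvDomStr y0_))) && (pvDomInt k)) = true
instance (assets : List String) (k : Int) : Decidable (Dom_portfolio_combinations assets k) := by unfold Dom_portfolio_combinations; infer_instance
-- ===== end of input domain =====

-- B replaces the itertools.combinations call with an explicit backtracking recursion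
-- (take each head, recurse on the tail, accumulate the chosen prefix); same order, same cost.


-- ===== PORT A =====
-- itertools.combinations(assets, k) in its documented lexicographic-by-position order
def pvCombA : Nat → List String → List (List String)
  | 0, _ => [[]]
  | _ + 1, [] => []
  | n + 1, x :: xs => (pvCombA n xs).map (x :: ·) ++ pvCombA (n + 1) xs

-- the guards raise ValueError in Python; those inputs are outside Pre_, the port returns []
def portfolio_combinations (assets : List String) (k : Int) : List (List String) :=
  if k ≤ 0 ∨ k > assets.length then [] else pvCombA k.toNat assets

-- ===== PORT B =====
-- combine(remaining, chosen): append chosen when full, else take each head in turn and recurse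
-- on the remaining suffix; acc is the mutable `result` list threaded through.
def pvCombB (k : Nat) : List String → List String → List (List String) → List (List String)
  | remaining, chosen, acc =>
    if chosen.length = k then acc ++ [chosen]
    else match remaining with
      | [] => acc
      | h :: t => pvCombB k t chosen (pvCombB k t (chosen ++ [h]) acc)

def portfolio_combinations_alt (assets : List String) (k : Int) : List (List String) :=
  if k ≤ 0 ∨ k > assets.length then [] else pvCombB k.toNat assets [] []

-- ===== PRECONDITION & SPEC =====
-- Pre_ excludes exactly the inputs where A raises ValueError: k ≤ 0 or k > len(assets)
def Pre_portfolio_combinations (assets : List String) (k : Int) : Prop :=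
  1 ≤ k ∧ k ≤ assets.length
instance (assets : List String) (k : Int) : Decidable (Pre_portfolio_combinations assets k) := by unfold Pre_portfolio_combinations; infer_instance
def pvWitness_portfolio_combinations : List String × Int := (["A", "B", "C"], 2)

def Spec_portfolio_combinations (assets : List String) (k : Int) (out : List (List String)) : Prop := out = portfolio_combinations_alt assets k
instance (assets : List String) (k : Int) (out : List (List String)) : Decidable (Spec_portfolio_combinations assets k out) := by unfold Spec_portfolio_combinations; infer_instance

-- ===== CLAIM (what is proved, stated in full; the proofs are below) =====
def Claim_equal_portfolio_combinations : Prop := ∀ (assets : List String) (k : Int), Dom_portfolio_combinations assets k → Pre_portfolio_combinations assets k → Spec_portfolio_combinations assets k (portfolio_combinations assets k)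

-- ===== LEMMAS AND PROOFS =====

-- loop invariant of B's backtracking recursion: with `chosen` already picked and n slots left,
-- it appends to acc exactly A's combinations of the remaining suffix, each prefixed by `chosen`
lemma pvCombB_eq (k : Nat) (remaining : List String) : ∀ (n : Nat) (chosen : List String)
    (acc : List (List String)), chosen.length + n = k →
    pvCombB k remaining chosen acc = acc ++ (pvCombA n remaining).map (chosen ++ ·) := by
  induction remaining with
  | nil =>
    intro n chosen acc h
    cases n with
    | zero => simp [pvCombB, pvCombA, show chosen.length = k by omega]
    | succ m =>
      have hne : chosen.length ≠ k := by omega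
      simp [pvCombB, hne, pvCombA]
  | cons x t ih =>
    intro n chosen acc h
    cases n with
    | zero => simp [pvCombB, pvCombA, show chosen.length = k by omega]
    | succ m =>
      have hne : chosen.length ≠ k := by omega
      have step : pvCombB k (x :: t) chosen acc
          = pvCombB k t chosen (pvCombB k t (chosen ++ [x]) acc) := by
        simp [pvCombB, hne]
      rw [step, ih m (chosen ++ [x]) acc (by simp; omega), ih (m + 1) chosen _ h]
      simp [pvCombA, List.map_map, Function.comp_def]

-- ===== VERDICT (by name: the statement is the Claim_ definition above) =====
theorem portfolio_combinations_spec : Claim_equal_portfolio_combinations := by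
  intro assets k _ hpre
  obtain ⟨h1, h2⟩ := hpre
  have hg : ¬(k ≤ 0 ∨ k > (assets.length : Int)) := by omega
  unfold Spec_portfolio_combinations portfolio_combinations portfolio_combinations_alt
  rw [if_neg hg, if_neg hg, pvCombB_eq k.toNat assets k.toNat [] [] (by simp)]
  simp
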